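-- pv_equiv track=rewrite | github.com/KindTechUK/open-foi | src/foi_cli/browser.py | _parse_attachment_url
-- ===== SOURCE A (Python) =====
-- def _parse_attachment_url(url: str) -> tuple[str, str]:
--     """Extract message_id and part number from attachment URL."""
--     parts = url.split("/")
--     msg_id = ""
--     part = ""
--     for i, segment in enumerate(parts):
--         if segment == "response" and i + 1 < len(parts):
--             msg_id = parts[i + 1]
--         if segment == "attach" and i + 1 < len(parts):
--             part = parts[i + 1]
--             break
--     return msg_id, part
-- ===== SOURCE B (Python) =====
-- def _parse_attachment_url(url: str) -> tuple[str, str]: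
--     """Extract message_id and part number from attachment URL."""
--     parts = url.split("/")
--     pairs = list(zip(parts, parts[1:]))
--     ai = next((k for k, (seg, _) in enumerate(pairs) if seg == "attach"), len(pairs))
--     part = pairs[ai][1] if ai < len(pairs) else ""
--     msg_id = ""
--     for seg, nxt in reversed(pairs[:ai]):
--         if seg == "response":
--             msg_id = nxt
--             break
--     return msg_id, part
-- ===== Notes on version B (the rewrite author's own statement) =====
-- stated objective: alternative
-- what changed: Replaces A's single interleaved enumerate-loop with two differently-shaped passes over (segment, next) pairs: a forward search for the first 'attach' pair, then a backward scan over the prefix before it for the last 'response' pair.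
import Mathlib
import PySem

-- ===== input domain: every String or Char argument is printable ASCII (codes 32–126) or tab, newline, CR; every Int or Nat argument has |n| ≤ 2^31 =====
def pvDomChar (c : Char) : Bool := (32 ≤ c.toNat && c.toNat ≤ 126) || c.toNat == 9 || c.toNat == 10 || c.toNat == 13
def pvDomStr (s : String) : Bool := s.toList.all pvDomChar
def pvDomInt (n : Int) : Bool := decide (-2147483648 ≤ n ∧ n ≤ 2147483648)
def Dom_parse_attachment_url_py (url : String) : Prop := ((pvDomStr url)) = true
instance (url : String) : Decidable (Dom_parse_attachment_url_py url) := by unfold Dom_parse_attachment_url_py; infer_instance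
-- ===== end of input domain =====

-- B replaces A's single interleaved loop by two passes over (segment, next) pairs: a forward
-- search for the first "attach" pair and a backward search for the last "response" pair before it
-- (objective: alternative decomposition; same cost).

-- ===== PORT A =====
-- A's loop over enumerate(parts): segment == parts[i], rest.headD "" == parts[i+1]
-- (with i+1 < len(parts) ↔ rest ≠ []).
def pvA_loop : List String → String → String → String × String
  | [], msg_id, part => (msg_id, part)
  | seg :: rest, msg_id, part =>
    let msg_id' := if seg == "response" && !rest.isEmpty then rest.headD "" else msg_id
    if seg == "attach" && !rest.isEmpty then (msg_id', rest.headD "")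
    else pvA_loop rest msg_id' part

def parse_attachment_url_py (url : String) : String × String :=
  let parts := PySem.Str.split? url "/" |>.getD []
  pvA_loop parts "" ""

-- ===== PORT B =====
def parse_attachment_url_py_alt (url : String) : String × String :=
  let parts := PySem.Str.split? url "/" |>.getD []
  let pairs := parts.zip parts.tail
  let ai := pairs.findIdx (fun p => p.1 == "attach")
  let part := match pairs[ai]? with | some p => p.2 | none => ""
  let msg_id := match (pairs.take ai).reverse.find? (fun p => p.1 == "response") with
                | some p => p.2 | none => ""
  (msg_id, part)

-- ===== PRECONDITION & SPEC =====
def Spec_parse_attachment_url_py (url : String) (out : String × String) : Prop := out = parse_attachment_url_py_alt url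
instance (url : String) (out : String × String) : Decidable (Spec_parse_attachment_url_py url out) := by unfold Spec_parse_attachment_url_py; infer_instance

-- ===== CLAIM (what is proved, stated in full; the proofs are below) =====
def Claim_equal_parse_attachment_url_py : Prop := ∀ (url : String), Dom_parse_attachment_url_py url → Spec_parse_attachment_url_py url (parse_attachment_url_py url)

-- ===== LEMMAS AND PROOFS =====

theorem pvA_loop_eq (l : List String) : ∀ (msg : String),
    pvA_loop l msg "" =
      (match (( (l.zip l.tail).take ((l.zip l.tail).findIdx (fun p => p.1 == "attach"))).reverse.find?
          (fun p => p.1 == "response")) with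
        | some p => p.2 | none => msg,
       match (l.zip l.tail)[(l.zip l.tail).findIdx (fun p => p.1 == "attach")]? with
        | some p => p.2 | none => "") := by
  induction l with
  | nil => intro msg; simp [pvA_loop]
  | cons a rest ih =>
    intro msg
    cases rest with
    | nil => simp [pvA_loop]
    | cons b rest' =>
      have step : pvA_loop (a :: b :: rest') msg "" =
          (if (a == "attach") = true then
            ((if (a == "response") = true then b else msg), b)
           else pvA_loop (b :: rest') (if (a == "response") = true then b else msg) "") := by
        conv_lhs => rw [pvA_loop]
        simp only [List.isEmpty_cons, Bool.not_false, Bool.and_true, List.headD_cons]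
      rw [step]
      by_cases hA : a = "attach"
      · subst hA
        simp [List.findIdx_cons]
      · have hA' : (a == "attach") = false := by simp [hA]
        rw [hA']
        simp only [Bool.false_eq_true, if_false]
        rw [ih]
        simp only [List.tail_cons, List.zip_cons_cons, List.findIdx_cons, hA', cond_false,
          List.take_succ_cons, List.reverse_cons, List.find?_append, List.getElem?_cons_succ]
        cases hfind : List.find? (fun p => p.1 == "response")
            (List.take (List.findIdx (fun p => p.1 == "attach") ((b :: rest').zip rest'))
              ((b :: rest').zip rest')).reverse with
        | some p => simp
        | none =>
          by_cases hR : a = "response" <;> simp [hR]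
-- ===== VERDICT (by name: the statement is the Claim_ definition above) =====
theorem parse_attachment_url_py_spec : Claim_equal_parse_attachment_url_py := by
  intro url _
  unfold Spec_parse_attachment_url_py parse_attachment_url_py parse_attachment_url_py_alt
  exact pvA_loop_eq _ ""
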